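-- pv_equiv track=rewrite | github.com/enzoescipy/baekjoon_short_term_growth | 3197.py | purify_string_matrix
-- ===== SOURCE A (Python) =====
-- class State:
--     ice = False
--     ice_str = "X"
--     water = True
--     water_str = "."
--
--     @classmethod
--     def str_to(cls, target):
--         if (target == cls.ice_str):
--             return cls.ice
--         elif(target == cls.water_str):
--             return cls.water
--         else:
--             return None
--
-- def purify_string_matrix(string_mat):
--     res = []
--     splitted = string_mat.split("\n")
--     swan_pos = []
--     for i in range(len(splitted)):
--         items = list(splitted[i])
--         symbolic_line = []
--         for j in range(len(items)):
--             item_res = State.str_to(items[j])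
--             if item_res == None:
--                 swan_pos.append((i,j))
--                 item_res = True
--             symbolic_line.append(item_res)
--         res.append(symbolic_line)
--
--     return (swan_pos, res)
-- ===== SOURCE B (Python) =====
-- def purify_string_matrix(string_mat):
--     # Single left-to-right pass over the raw characters: no split(), the
--     # newline handling and row/column counters are maintained explicitly.
--     swan_pos = []
--     res = []
--     row = []
--     i = 0
--     j = 0
--     for c in string_mat:
--         if c == "\n":
--             res.append(row)
--             row = []
--             i += 1
--             j = 0
--         else:
--             if c != "X" and c != ".":
--                 swan_pos.append((i, j))
--             row.append(c != "X")
--             j += 1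
--     res.append(row)
--     return (swan_pos, res)
-- ===== Notes on version B (the rewrite author's own statement) =====
-- stated objective: alternative
-- what changed: Replaces A's split-then-nested-index-loops with a single state-machine pass over the raw characters: no line-splitting step and no State sentinel class; newlines are handled inline with explicit row/column counters and a pending-row accumulator, so no intermediate split list or list() copies are built.
import Mathlib
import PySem

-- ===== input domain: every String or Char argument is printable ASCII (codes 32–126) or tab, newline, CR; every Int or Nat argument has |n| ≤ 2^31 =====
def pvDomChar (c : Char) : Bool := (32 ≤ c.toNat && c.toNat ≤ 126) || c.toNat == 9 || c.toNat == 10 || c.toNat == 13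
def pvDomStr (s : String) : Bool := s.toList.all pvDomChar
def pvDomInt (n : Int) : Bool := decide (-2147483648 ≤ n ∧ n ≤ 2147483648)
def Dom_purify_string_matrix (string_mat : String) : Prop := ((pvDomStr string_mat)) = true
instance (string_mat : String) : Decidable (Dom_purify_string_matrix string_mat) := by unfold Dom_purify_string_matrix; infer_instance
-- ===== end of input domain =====

-- B replaces A's split('\n')-then-nested-index-loops (with the State sentinel class) by a
-- single state-machine pass over the raw characters with explicit row/column counters
-- (objective: alternative).

-- ===== PORT A =====
-- State.str_to
def pvStateStrTo (target : Char) : Option Bool :=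
  if target = 'X' then some false
  else if target = '.' then some true
  else none

-- inner loop over the characters of line i (j is the running column index)
def pvRowA (i : Int) (j : Int) : List Char → List (Int × Int) × List Bool
  | [] => ([], [])
  | c :: rest =>
    let r := pvRowA i (j + 1) rest
    match pvStateStrTo c with
    | none => ((i, j) :: r.1, true :: r.2)
    | some b => (r.1, b :: r.2)

-- outer loop over the split lines (i is the running row index)
def pvLinesA (i : Int) : List (List Char) → List (Int × Int) × List (List Bool)
  | [] => ([], [])
  | l :: rest =>
    let row := pvRowA i 0 l
    let r := pvLinesA (i + 1) rest
    (row.1 ++ r.1, row.2 :: r.2)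

def purify_string_matrix (string_mat : String) : (List (Int × Int)) × List (List Bool) :=
  pvLinesA 0 (PySem.Chars.splitOn string_mat.toList ['\n'])

-- ===== PORT B =====
-- one step of Source B's for-loop; state = (swan_pos, res, row, i, j)
def pvStepB (st : List (Int × Int) × List (List Bool) × List Bool × Int × Int) (c : Char) :
    List (Int × Int) × List (List Bool) × List Bool × Int × Int :=
  match st with
  | (swan, res, row, i, j) =>
    if c = '\n' then (swan, res ++ [row], [], i + 1, 0)
    else ((if c ≠ 'X' ∧ c ≠ '.' then swan ++ [(i, j)] else swan),
          res, row ++ [(c != 'X')], i, j + 1)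

def purify_string_matrix_alt (string_mat : String) : (List (Int × Int)) × List (List Bool) :=
  let st := string_mat.toList.foldl pvStepB ([], [], [], 0, 0)
  (st.1, st.2.1 ++ [st.2.2.1])

-- ===== PRECONDITION & SPEC =====
def Spec_purify_string_matrix (string_mat : String) (out : (List (Int × Int)) × List (List Bool)) : Prop := out = purify_string_matrix_alt string_mat
instance (string_mat : String) (out : (List (Int × Int)) × List (List Bool)) : Decidable (Spec_purify_string_matrix string_mat out) := by unfold Spec_purify_string_matrix; infer_instance

-- ===== CLAIM (what is proved, stated in full; the proofs are below) =====
def Claim_equal_purify_string_matrix : Prop := ∀ (string_mat : String), Dom_purify_string_matrix string_mat → Spec_purify_string_matrix string_mat (purify_string_matrix string_mat)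

-- ===== LEMMAS AND PROOFS =====

-- proof-only intermediate: one char-level recursion both ports are reduced to.
-- pvScan i j cs = (swan positions in cs, booleans of the current (first) line, remaining lines)
def pvScan (i j : Int) : List Char → List (Int × Int) × List Bool × List (List Bool)
  | [] => ([], [], [])
  | c :: cs =>
    if c = '\n' then
      let r := pvScan (i + 1) 0 cs
      (r.1, [], r.2.1 :: r.2.2)
    else
      let r := pvScan i (j + 1) cs
      ((if c ≠ 'X' ∧ c ≠ '.' then (i, j) :: r.1 else r.1), (c != 'X') :: r.2.1, r.2.2)

-- functional model of splitting on '\n': (first line, remaining lines)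
def pvSplit' : List Char → List Char × List (List Char)
  | [] => ([], [])
  | c :: cs =>
    if c = '\n' then ([], (pvSplit' cs).1 :: (pvSplit' cs).2)
    else (c :: (pvSplit' cs).1, (pvSplit' cs).2)

lemma pvSplitOn_go_spec (fuel : ℕ) :
    ∀ (l cur : List Char) (acc : List (List Char)), l.length < fuel →
      PySem.Chars.splitOn.go ['\n'] fuel l cur acc =
        acc.reverse ++ (cur.reverse ++ (pvSplit' l).1) :: (pvSplit' l).2 := by
  induction fuel with
  | zero => intro l cur acc h; omega
  | succ f ih =>
    intro l cur acc h
    cases l with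
    | nil => simp [PySem.Chars.splitOn.go, pvSplit']
    | cons c rest =>
      by_cases hc : c = '\n'
      · subst hc
        simp only [PySem.Chars.splitOn.go, List.isPrefixOf]
        rw [if_pos (by simp)]
        have hdrop : List.drop ['\n'].length ('\n' :: rest) = rest := rfl
        rw [hdrop, ih rest [] (cur.reverse :: acc) (by simpa using Nat.lt_of_succ_lt_succ h)]
        simp [pvSplit']
      · simp only [PySem.Chars.splitOn.go]
        rw [if_neg (by simp [List.isPrefixOf, Ne.symm hc])]
        rw [ih rest (c :: cur) acc (by simpa using Nat.lt_of_succ_lt_succ h)]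
        simp [pvSplit', hc]

lemma pvSplitOn_newline (cs : List Char) :
    PySem.Chars.splitOn cs ['\n'] = (pvSplit' cs).1 :: (pvSplit' cs).2 := by
  unfold PySem.Chars.splitOn
  rw [pvSplitOn_go_spec (cs.length + 1) cs [] [] (by omega)]
  simp

-- A's line/column loops over the split evaluate to pvScan
lemma pvScan_eq_A (cs : List Char) : ∀ (i j : Int),
    pvScan i j cs =
      ((pvRowA i j (pvSplit' cs).1).1 ++ (pvLinesA (i + 1) (pvSplit' cs).2).1,
       (pvRowA i j (pvSplit' cs).1).2,
       (pvLinesA (i + 1) (pvSplit' cs).2).2) := by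
  induction cs with
  | nil => intro i j; simp [pvScan, pvSplit', pvRowA, pvLinesA]
  | cons c cs ih =>
    intro i j
    by_cases hc : c = '\n'
    · subst hc
      simp [pvScan, pvSplit', ih, pvRowA, pvLinesA]
    · by_cases hx : c = 'X'
      · subst hx
        simp [pvScan, pvSplit', pvRowA, pvStateStrTo, ih]
      · by_cases hd : c = '.'
        · subst hd
          simp [pvScan, pvSplit', pvRowA, pvStateStrTo, ih]
        · simp [pvScan, pvSplit', pvRowA, pvStateStrTo, hc, hx, hd, ih]

-- B's foldl with append-accumulators evaluates to pvScan
lemma pvFoldB_eq (cs : List Char) :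
    ∀ (swan : List (Int × Int)) (res : List (List Bool)) (row : List Bool) (i j : Int),
      (fun st : List (Int × Int) × List (List Bool) × List Bool × Int × Int =>
          (st.1, st.2.1 ++ [st.2.2.1])) (List.foldl pvStepB (swan, res, row, i, j) cs) =
        (swan ++ (pvScan i j cs).1,
         res ++ (row ++ (pvScan i j cs).2.1) :: (pvScan i j cs).2.2) := by
  induction cs with
  | nil => intro swan res row i j; simp [pvScan]
  | cons c cs ih =>
    intro swan res row i j
    by_cases hc : c = '\n'
    · subst hc
      simp only [List.foldl_cons, pvStepB, ih, pvScan]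
      simp
    · by_cases hs : c ≠ 'X' ∧ c ≠ '.'
      · simp only [List.foldl_cons, pvStepB, if_neg hc, if_pos hs, ih, pvScan]
        simp
      · simp only [List.foldl_cons, pvStepB, if_neg hc, if_neg hs, ih, pvScan]
        simp

-- ===== VERDICT (by name: the statement is the Claim_ definition above) =====
theorem purify_string_matrix_spec : Claim_equal_purify_string_matrix := by
  intro s _
  show _ = _
  have hB := pvFoldB_eq s.toList [] [] [] 0 0
  simp only [List.nil_append] at hB
  simp only [purify_string_matrix, purify_string_matrix_alt, pvSplitOn_newline,
    pvLinesA, hB, pvScan_eq_A s.toList 0 0]
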